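-- pv_equiv track=rewrite | github.com/yohey-w/codd-dev | codd/repair/repairability_classifier.py | _intersects_changed_files
-- ===== SOURCE A (Python) =====
-- def _intersects_changed_files(affected: set[str], changed: set[str]) -> bool:
--     if not affected or not changed:
--         return False
--     for item in affected:
--         for candidate in changed:
--             if item == candidate or candidate.startswith(item + "/") or item.startswith(candidate + "/"):
--                 return True
--     return False
-- ===== SOURCE B (Python) =====
-- def _intersects_changed_files(affected: set[str], changed: set[str]) -> bool:
--     if not affected or not changed:
--         return False
--     changed_set = set(changed)
--     affected_set = set(affected)
--     for a in affected:
--         if a in changed_set: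
--             return True
--         for i, ch in enumerate(a):
--             if ch == '/' and a[:i] in changed_set:
--                 return True
--     for c in changed:
--         for i, ch in enumerate(c):
--             if ch == '/' and c[:i] in affected_set:
--                 return True
--     return False
-- ===== Notes on version B (the rewrite author's own statement) =====
-- stated objective: alternative
-- what changed: Replaces A's all-pairs nested startswith scan with two hash-set passes: each path's '/'-cut ancestor prefixes are looked up by set membership in the other side's path set, removing the inner per-pair string comparisons (O((n+m)*L) worst case vs O(n*m*L), though A's early exit often hides this on intersecting inputs).
import Mathlib
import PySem

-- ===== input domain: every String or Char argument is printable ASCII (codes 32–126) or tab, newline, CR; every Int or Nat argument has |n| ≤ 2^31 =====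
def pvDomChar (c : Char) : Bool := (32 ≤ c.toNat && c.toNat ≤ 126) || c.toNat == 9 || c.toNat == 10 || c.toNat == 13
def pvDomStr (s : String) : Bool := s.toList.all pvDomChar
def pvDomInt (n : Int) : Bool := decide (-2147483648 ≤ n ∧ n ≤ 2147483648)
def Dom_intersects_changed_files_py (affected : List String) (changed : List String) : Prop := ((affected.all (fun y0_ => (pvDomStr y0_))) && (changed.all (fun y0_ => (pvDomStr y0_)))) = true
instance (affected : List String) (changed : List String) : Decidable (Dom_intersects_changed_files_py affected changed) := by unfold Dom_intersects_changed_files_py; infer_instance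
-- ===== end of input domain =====

-- B replaces A's all-pairs startswith scan by two hash-set passes: each path's '/'-cut
-- ancestor prefixes are looked up by membership in a set of the other side's paths
-- (objective: alternative algorithm).
-- Equivalence of the RETURN value is proved; the set arguments are never mutated.

-- ===== PORT A =====
def intersects_changed_files_py (affected : List String) (changed : List String) : Bool :=
  if affected.isEmpty || changed.isEmpty then false
  else
    affected.any fun item => changed.any fun candidate =>
      item == candidate
        || PySem.Str.startswith candidate (item ++ "/")
        || PySem.Str.startswith item (candidate ++ "/")

-- ===== PORT B =====
-- helper: the strings a[:i] for each position i with a[i] == '/', via enumerate (B's inner loop)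
def pvSlashPrefixes (s : String) : List String :=
  (PySem.List.enumerate s.toList).filterMap
    (fun p => if p.2 == '/' then some (String.ofList (s.toList.take p.1.toNat)) else none)

def intersects_changed_files_py_alt (affected : List String) (changed : List String) : Bool :=
  if affected.isEmpty || changed.isEmpty then false
  else
    let changedSet : PySem.Set String := PySem.Set.ofList changed
    let affectedSet : PySem.Set String := PySem.Set.ofList affected
    (affected.any fun a =>
      changedSet.contains a || (pvSlashPrefixes a).any fun p => changedSet.contains p)
    || (changed.any fun c => (pvSlashPrefixes c).any fun p => affectedSet.contains p)

-- ===== PRECONDITION & SPEC =====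
def Spec_intersects_changed_files_py (affected : List String) (changed : List String) (out : Bool) : Prop := out = intersects_changed_files_py_alt affected changed
instance (affected : List String) (changed : List String) (out : Bool) : Decidable (Spec_intersects_changed_files_py affected changed out) := by unfold Spec_intersects_changed_files_py; infer_instance

-- ===== CLAIM (what is proved, stated in full; the proofs are below) =====
def Claim_equal_intersects_changed_files_py : Prop := ∀ (affected : List String) (changed : List String), Dom_intersects_changed_files_py affected changed → Spec_intersects_changed_files_py affected changed (intersects_changed_files_py affected changed)

-- ===== LEMMAS AND PROOFS =====

-- a ++ ['/'] is a prefix of cs iff a is cs cut at some '/' position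
theorem pvPrefixSlashIff (a cs : List Char) :
    (a ++ ['/']) <+: cs ↔ ∃ k : Nat, cs[k]? = some '/' ∧ a = cs.take k := by
  constructor
  · rintro ⟨t, ht⟩
    refine ⟨a.length, ?_, ?_⟩
    · subst ht; simp
    · subst ht; simp
  · rintro ⟨k, hk, ha⟩
    have hlt : k < cs.length := by
      by_contra h
      simp [List.getElem?_eq_none (by omega : cs.length ≤ k)] at hk
    refine ⟨cs.drop (k+1), ?_⟩
    subst ha
    have hcat : cs.take k ++ ['/'] = cs.take (k+1) := by
      rw [List.take_add_one, hk]
      simp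
    rw [hcat, List.take_append_drop]

theorem pvMemSlashPrefixes (x s : String) :
    x ∈ pvSlashPrefixes s ↔ (x.toList ++ ['/']) <+: s.toList := by
  rw [pvPrefixSlashIff]
  unfold pvSlashPrefixes
  simp only [List.mem_filterMap, PySem.List.mem_enumerate_iff]
  constructor
  · rintro ⟨⟨i, ch⟩, ⟨k, hk, hp⟩, h⟩
    simp only [Prod.mk.injEq] at hp
    obtain ⟨hi, hc⟩ := hp
    by_cases hch : ch = '/'
    · refine ⟨k, by simp [List.getElem?_eq_getElem hk, ← hc, hch], ?_⟩
      simp [hch, hi] at h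
      rw [← h, String.toList_ofList]
    · simp [hch] at h
  · rintro ⟨k, hk, hx⟩
    have hlt : k < s.toList.length := by
      by_contra h
      simp [List.getElem?_eq_none (by omega : s.toList.length ≤ k)] at hk
    refine ⟨((k : Int), '/'), ⟨k, hlt, by simp [List.getElem?_eq_getElem hlt] at hk; simp [hk]⟩, ?_⟩
    simp
    rw [← hx, String.ofList_toList]

-- ===== VERDICT (by name: the statement is the Claim_ definition above) =====
theorem intersects_changed_files_py_spec : Claim_equal_intersects_changed_files_py := by
  intro affected changed _
  unfold Spec_intersects_changed_files_py intersects_changed_files_py intersects_changed_files_py_alt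
  by_cases hg : (affected.isEmpty || changed.isEmpty) = true
  · simp only [hg, if_true]
  · rw [if_neg hg, if_neg hg]
    apply Bool.eq_iff_iff.mpr
    simp only [List.any_eq_true, Bool.or_eq_true, beq_iff_eq,
      PySem.Str.startswith_eq, PySem.Chars.startswith_iff,
      PySem.Set.contains_iff, PySem.Set.mem_ofList,
      pvMemSlashPrefixes, String.toList_append]
    constructor
    · rintro ⟨a, ha, c, hc, (h | h) | h⟩
      · exact Or.inl ⟨a, ha, Or.inl (h ▸ hc)⟩
      · exact Or.inr ⟨c, hc, a, by simpa using h, ha⟩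
      · exact Or.inl ⟨a, ha, Or.inr ⟨c, by simpa using h, hc⟩⟩
    · rintro (⟨a, ha, hc | ⟨p, hp, hpc⟩⟩ | ⟨c, hc, p, hp, hpa⟩)
      · exact ⟨a, ha, a, hc, Or.inl (Or.inl rfl)⟩
      · exact ⟨a, ha, p, hpc, Or.inr (by simpa using hp)⟩
      · exact ⟨p, hpa, c, hc, Or.inl (Or.inr (by simpa using hp))⟩
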